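-- pv_equiv track=rewrite | github.com/mashati/PyCharmTestProject | script.py | check_professor_grading
-- ===== SOURCE A (Python) =====
-- def check_professor_grading(grades_and_status):
--     """
--     Check if professor's grading is consistent and determine passing threshold if it is.
--
--     Args:
--     grades_and_status: list of tuples (student_name, grade, status)
--     """
--     # Extract scores for Passed and Failed students
--     passed_scores = [score for _, score, status in grades_and_status if status == "Passed"]
--     failed_scores = [score for _, score, status in grades_and_status if status == "Failed"]
--
--     if passed_scores and failed_scores:
--         max_failed = max(failed_scores)
--         min_passed = min(passed_scores)
--
--         if max_failed >= min_passed: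
--             return False, None  # Professor was inconsistent
--         else:
--             return True, (max_failed + 1, min_passed)  # Professor was consistent
--     elif passed_scores:
--         return True, (0, min(passed_scores))
--     elif failed_scores:
--         return True, (max(failed_scores), 100)
--     else:
--         return True, None
-- ===== SOURCE B (Python) =====
-- def check_professor_grading(grades_and_status):
--     """Sort-based: order records by score once; then the passing boundary is
--     positional -- the first 'Passed' record in sorted order carries the minimal
--     passing score and the last 'Failed' record carries the maximal failing score."""
--     ordered = sorted(grades_and_status, key=lambda t: t[1])
--     min_passed = next((sc for _, sc, st in ordered if st == "Passed"), None)
--     max_failed = next((sc for _, sc, st in reversed(ordered) if st == "Failed"), None)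
--     if min_passed is None and max_failed is None:
--         return True, None
--     if min_passed is None:
--         return True, (max_failed, 100)
--     if max_failed is None:
--         return True, (0, min_passed)
--     if max_failed >= min_passed:
--         return False, None
--     return True, (max_failed + 1, min_passed)
-- ===== Notes on version B (the rewrite author's own statement) =====
-- stated objective: alternative
-- what changed: Replaces A's two comprehension passes plus max()/min() reductions with a single sort by score followed by positional picks: the first 'Passed' record in sorted order gives min_passed and the last 'Failed' record gives max_failed; no min/max comparisons remain.
import Mathlib
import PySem

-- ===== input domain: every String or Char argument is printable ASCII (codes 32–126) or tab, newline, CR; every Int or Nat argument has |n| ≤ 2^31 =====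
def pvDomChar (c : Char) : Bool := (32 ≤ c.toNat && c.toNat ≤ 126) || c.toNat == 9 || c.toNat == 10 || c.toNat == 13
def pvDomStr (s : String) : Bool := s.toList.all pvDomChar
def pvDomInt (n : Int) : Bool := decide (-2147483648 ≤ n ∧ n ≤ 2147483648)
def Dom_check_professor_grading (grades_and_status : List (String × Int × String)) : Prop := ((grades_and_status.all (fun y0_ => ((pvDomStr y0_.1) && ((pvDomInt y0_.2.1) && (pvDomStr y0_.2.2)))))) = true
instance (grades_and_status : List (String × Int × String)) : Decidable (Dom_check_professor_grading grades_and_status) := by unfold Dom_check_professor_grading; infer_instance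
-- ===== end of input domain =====

-- B replaces A's comprehension passes plus max()/min() reductions by one sort by score and positional picks (first 'Passed' / last 'Failed' in sorted order); return values proved equal.

-- ===== PORT A =====
def check_professor_grading (grades_and_status : List (String × Int × String)) : Bool × (Option (Int × Int)) :=
  let passed_scores := grades_and_status.filterMap (fun t => if t.2.2 == "Passed" then some t.2.1 else none)
  let failed_scores := grades_and_status.filterMap (fun t => if t.2.2 == "Failed" then some t.2.1 else none)
  if !passed_scores.isEmpty && !failed_scores.isEmpty then
    let max_failed := (PySem.List.max? failed_scores (fun x => x)).getD 0   -- list nonempty: max? = some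
    let min_passed := (PySem.List.min? passed_scores (fun x => x)).getD 0
    if max_failed ≥ min_passed then (false, none)
    else (true, some (max_failed + 1, min_passed))
  else if !passed_scores.isEmpty then
    (true, some (0, (PySem.List.min? passed_scores (fun x => x)).getD 0))
  else if !failed_scores.isEmpty then
    (true, some ((PySem.List.max? failed_scores (fun x => x)).getD 0, 100))
  else (true, none)

-- ===== PORT B =====
-- Source B: sort by score; min_passed = first 'Passed' in sorted order (next(...) = find?),
-- max_failed = first 'Failed' in reversed(sorted) order; then the None-branch ladder.
def check_professor_grading_alt (grades_and_status : List (String × Int × String)) : Bool × (Option (Int × Int)) :=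
  let ordered := PySem.List.sorted grades_and_status (fun t => t.2.1)
  let min_passed := (ordered.find? (fun t => t.2.2 == "Passed")).map (fun t => t.2.1)
  let max_failed := (ordered.reverse.find? (fun t => t.2.2 == "Failed")).map (fun t => t.2.1)
  match min_passed, max_failed with
  | none, none => (true, none)
  | none, some mf => (true, some (mf, 100))
  | some mp, none => (true, some (0, mp))
  | some mp, some mf => if mf ≥ mp then (false, none) else (true, some (mf + 1, mp))

-- ===== PRECONDITION & SPEC =====
def Spec_check_professor_grading (grades_and_status : List (String × Int × String)) (out : Bool × (Option (Int × Int))) : Prop := out = check_professor_grading_alt grades_and_status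
instance (grades_and_status : List (String × Int × String)) (out : Bool × (Option (Int × Int))) : Decidable (Spec_check_professor_grading grades_and_status out) := by unfold Spec_check_professor_grading; infer_instance

-- ===== CLAIM (what is proved, stated in full; the proofs are below) =====
def Claim_equal_check_professor_grading : Prop := ∀ (grades_and_status : List (String × Int × String)), Dom_check_professor_grading grades_and_status → Spec_check_professor_grading grades_and_status (check_professor_grading grades_and_status)

-- ===== LEMMAS AND PROOFS =====

-- the first record with a given status, projected to its score, is the head of the score comprehension
theorem cpg_find?_map_score (s : List (String × Int × String)) (tag : String) :
    ((s.find? (fun t => t.2.2 == tag)).map (fun t => t.2.1)) =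
      (s.filterMap (fun t => if t.2.2 == tag then some t.2.1 else none)).head? := by
  induction s with
  | nil => rfl
  | cons h t ih =>
    simp only [List.find?_cons, List.filterMap_cons]
    by_cases hh : h.2.2 = tag
    · simp [hh]
    · simp only [show (h.2.2 == tag) = false by simp [hh]]
      simpa using ih

-- in a list of Ints that is a permutation of an ascending list, min (first minimal) is the head
theorem cpg_min?_eq_head (xs ys : List Int) (hp : List.Perm ys xs)
    (hx : xs.Pairwise (· ≤ ·)) : PySem.List.min? ys (fun x => x) = xs.head? := by
  cases xs with
  | nil =>
    have : ys = [] := List.Perm.eq_nil hp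
    simp [this, PySem.List.min?]
  | cons h t =>
    have hyne : ys ≠ [] := by
      intro hnil; rw [hnil] at hp; exact (by simp : (h :: t) ≠ []) (List.Perm.nil_eq hp).symm
    cases hm : PySem.List.min? ys (fun x => x) with
    | none => exact absurd ((PySem.List.min?_eq_none_iff ys (fun x => x)).mp hm) hyne
    | some m =>
      have hmem : m ∈ ys := PySem.List.min?_mem hm
      have hmle : ∀ y ∈ ys, m ≤ y := by
        intro y hy; exact PySem.List.min?_isMin hm y hy
      have hhy : h ∈ ys := hp.mem_iff.mpr (by simp)
      have h1 : m ≤ h := hmle h hhy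
      have h2 : h ≤ m := by
        have := hp.mem_iff.mp hmem
        rcases List.mem_cons.mp this with rfl | hmt
        · exact le_refl _
        · exact (List.pairwise_cons.mp hx).1 m hmt
      simp [le_antisymm h1 h2]

-- dually for the max (first maximal) and a descending list
theorem cpg_max?_eq_head (xs ys : List Int) (hp : List.Perm ys xs)
    (hx : xs.Pairwise (fun a b => b ≤ a)) : PySem.List.max? ys (fun x => x) = xs.head? := by
  cases xs with
  | nil =>
    have : ys = [] := List.Perm.eq_nil hp
    simp [this, PySem.List.max?]
  | cons h t =>
    have hyne : ys ≠ [] := by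
      intro hnil; rw [hnil] at hp; exact (by simp : (h :: t) ≠ []) (List.Perm.nil_eq hp).symm
    cases hm : PySem.List.max? ys (fun x => x) with
    | none => exact absurd ((PySem.List.max?_eq_none_iff ys (fun x => x)).mp hm) hyne
    | some m =>
      have hmem : m ∈ ys := PySem.List.max?_mem hm
      have hmle : ∀ y ∈ ys, y ≤ m := by
        intro y hy; exact PySem.List.max?_isMax hm y hy
      have hhy : h ∈ ys := hp.mem_iff.mpr (by simp)
      have h1 : h ≤ m := hmle h hhy
      have h2 : m ≤ h := by
        have := hp.mem_iff.mp hmem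
        rcases List.mem_cons.mp this with rfl | hmt
        · exact le_refl _
        · exact (List.pairwise_cons.mp hx).1 m hmt
      simp [le_antisymm h2 h1]

-- comprehension over the score-sorted list: B's first-'Passed' score IS A's min(passed_scores)
theorem cpg_minPassed (l : List (String × Int × String)) :
    (((PySem.List.sorted l (fun t => t.2.1)).find? (fun t => t.2.2 == "Passed")).map (fun t => t.2.1)) =
      PySem.List.min? (l.filterMap (fun t => if t.2.2 == "Passed" then some t.2.1 else none)) (fun x => x) := by
  rw [cpg_find?_map_score]
  set s := PySem.List.sorted l (fun t => t.2.1) with hs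
  have hpw : s.Pairwise (fun a b => a.2.1 ≤ b.2.1) := PySem.List.sorted_pairwise l (fun t => t.2.1)
  have hpwF : (s.filterMap (fun t => if t.2.2 == "Passed" then some t.2.1 else none)).Pairwise (· ≤ ·) := by
    refine List.Pairwise.filterMap _ ?_ hpw
    intro a b hab x hx y hy
    by_cases ha : a.2.2 = "Passed" <;> by_cases hb : b.2.2 = "Passed" <;>
      simp [ha, hb] at hx hy
    omega
  have hperm : List.Perm (l.filterMap (fun t => if t.2.2 == "Passed" then some t.2.1 else none))
      (s.filterMap (fun t => if t.2.2 == "Passed" then some t.2.1 else none)) :=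
    List.Perm.filterMap _ (PySem.List.sorted_perm l (fun t => t.2.1) false).symm
  rw [cpg_min?_eq_head _ _ hperm hpwF]

-- B's last-'Failed' score IS A's max(failed_scores)
theorem cpg_maxFailed (l : List (String × Int × String)) :
    (((PySem.List.sorted l (fun t => t.2.1)).reverse.find? (fun t => t.2.2 == "Failed")).map (fun t => t.2.1)) =
      PySem.List.max? (l.filterMap (fun t => if t.2.2 == "Failed" then some t.2.1 else none)) (fun x => x) := by
  rw [cpg_find?_map_score]
  set s := PySem.List.sorted l (fun t => t.2.1) with hs
  have hpw : s.Pairwise (fun a b => a.2.1 ≤ b.2.1) := PySem.List.sorted_pairwise l (fun t => t.2.1)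
  have hpwr : s.reverse.Pairwise (fun a b => b.2.1 ≤ a.2.1) := by
    rw [List.pairwise_reverse]; exact hpw
  have hpwF : (s.reverse.filterMap (fun t => if t.2.2 == "Failed" then some t.2.1 else none)).Pairwise (fun a b => b ≤ a) := by
    refine List.Pairwise.filterMap _ ?_ hpwr
    intro a b hab x hx y hy
    by_cases ha : a.2.2 = "Failed" <;> by_cases hb : b.2.2 = "Failed" <;>
      simp [ha, hb] at hx hy
    omega
  have hperm : List.Perm (l.filterMap (fun t => if t.2.2 == "Failed" then some t.2.1 else none))
      (s.reverse.filterMap (fun t => if t.2.2 == "Failed" then some t.2.1 else none)) :=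
    List.Perm.filterMap _ ((s.reverse_perm.trans (PySem.List.sorted_perm l (fun t => t.2.1) false))).symm
  rw [cpg_max?_eq_head _ _ hperm hpwF]

-- ===== VERDICT (by name: the statement is the Claim_ definition above) =====
theorem check_professor_grading_spec : Claim_equal_check_professor_grading := by
  unfold Claim_equal_check_professor_grading
  intro l _
  unfold Spec_check_professor_grading check_professor_grading check_professor_grading_alt
  simp only [cpg_minPassed, cpg_maxFailed]
  set P := l.filterMap (fun t => if t.2.2 == "Passed" then some t.2.1 else none) with hP
  set F := l.filterMap (fun t => if t.2.2 == "Failed" then some t.2.1 else none) with hF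
  cases hQe : PySem.List.min? P (fun x => x) with
  | none =>
    have hPnil : P = [] := (PySem.List.min?_eq_none_iff P (fun x => x)).mp hQe
    cases hPe : PySem.List.max? F (fun x => x) with
    | none =>
      have hFnil : F = [] := (PySem.List.max?_eq_none_iff F (fun x => x)).mp hPe
      simp [hPnil, hFnil]
    | some mf =>
      have hFne : F ≠ [] := by
        intro h; rw [h] at hPe; simp [PySem.List.max?] at hPe
      simp [hPnil, hFne]
  | some mp =>
    have hPne : P ≠ [] := by
      intro h; rw [h] at hQe; simp [PySem.List.min?] at hQe
    cases hPe : PySem.List.max? F (fun x => x) with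
    | none =>
      have hFnil : F = [] := (PySem.List.max?_eq_none_iff F (fun x => x)).mp hPe
      simp [hPne, hFnil]
    | some mf =>
      have hFne : F ≠ [] := by
        intro h; rw [h] at hPe; simp [PySem.List.max?] at hPe
      simp [hPne, hFne]
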